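-- pv_equiv track=rewrite | github.com/PyJudge/pdf4vllm-mcp | src/table_converter.py | fill_merged_cells
-- ===== SOURCE A (Python) =====
-- from typing import List
--
-- def fill_merged_cells(table: List[List]) -> List[List]:
--     """
--     Handle merged cells: fill empty cells (None) with value from above
--
--     Args:
--         table: pdfplumber extract_tables() result (list of lists)
--
--     Returns:
--         Table with merged cells filled
--     """
--     if not table or len(table) == 0:
--         return table
--
--     # Process each column
--     filled_table = [row[:] for row in table]  # Copy
--
--     for col_idx in range(len(filled_table[0])):
--         last_value = None
--
--         for row in filled_table:
--             if col_idx >= len(row):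
--                 continue
--
--             cell = row[col_idx]
--
--             # Copy value from above if cell is empty
--             if cell is None or (isinstance(cell, str) and cell.strip() == ''):
--                 row[col_idx] = last_value or ''
--             else:
--                 # Store value if present
--                 last_value = cell
--
--     return filled_table
-- ===== SOURCE B (Python) =====
-- def fill_merged_cells(table):
--     """
--     Handle merged cells stateless-ly: each empty cell (within the first row's
--     width) looks UPWARD in its column for the nearest non-empty cell; the table
--     is rebuilt with comprehensions instead of being copied and mutated.
--     """
--     if not table or len(table) == 0:
--         return table
--
--     width = len(table[0])
--
--     def is_empty(cell):
--         return cell is None or (isinstance(cell, str) and cell.strip() == '')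
--
--     def value_above(i, c):
--         for j in range(i - 1, -1, -1):
--             row = table[j]
--             if c < len(row) and not is_empty(row[c]):
--                 return row[c]
--         return ''
--
--     return [
--         [value_above(i, c) if c < width and is_empty(cell) else cell
--          for c, cell in enumerate(row)]
--         for i, row in enumerate(table)
--     ]
-- ===== Notes on version B (the rewrite author's own statement) =====
-- stated objective: alternative
-- what changed: Replaced A's stateful column-major forward-fill (copy, then mutate rows while threading a last_value accumulator) by a stateless rebuild: comprehensions construct a new table in which each empty cell independently searches upward in its column for the nearest non-empty cell.
import Mathlib
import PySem

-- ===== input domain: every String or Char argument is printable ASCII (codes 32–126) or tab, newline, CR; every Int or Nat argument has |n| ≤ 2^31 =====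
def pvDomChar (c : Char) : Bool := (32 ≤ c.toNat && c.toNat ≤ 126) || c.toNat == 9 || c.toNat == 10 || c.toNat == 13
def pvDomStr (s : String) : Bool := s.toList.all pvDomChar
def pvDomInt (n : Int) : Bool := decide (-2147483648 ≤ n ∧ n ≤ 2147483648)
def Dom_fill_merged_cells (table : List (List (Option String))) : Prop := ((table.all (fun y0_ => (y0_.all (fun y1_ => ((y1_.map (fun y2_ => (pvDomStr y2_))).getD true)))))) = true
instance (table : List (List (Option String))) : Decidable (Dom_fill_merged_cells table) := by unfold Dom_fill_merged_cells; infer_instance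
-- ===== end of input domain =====

-- B rebuilds the table stateless-ly (each empty cell searches upward in its column for the nearest
-- non-empty cell) instead of A's stateful column-major mutation; return-value equivalence (both
-- leave the input unmutated: A copies it first, B builds a new table).

-- ===== PORT A =====
-- `cell is None or cell.strip() == ''` (cells are Option String, so isinstance is always true)
def pvIsEmptyCell (cell : Option String) : Bool :=
  match cell with
  | none => true
  | some s => PySem.Str.strip s == ""

-- A's inner `for row in filled_table` loop for one column, mutating each row at col c
def pvFillColA (c : Nat) : Option String → List (List (Option String)) → List (List (Option String))
  | _, [] => []
  | last, r :: rs =>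
    if c ≥ r.length then r :: pvFillColA c last rs
    else
      let cell := r.getD c none
      if pvIsEmptyCell cell then r.set c (some (last.getD "")) :: pvFillColA c last rs
      else r :: pvFillColA c cell rs

def fill_merged_cells (table : List (List (Option String))) : List (List (Option String)) :=
  if table.isEmpty then table
  else (List.range (table.headD []).length).foldl (fun t c => pvFillColA c none t) table

-- ===== PORT B =====
-- B's `is_empty(cell)` helper
def pvIsEmptyB (cell : Option String) : Bool :=
  match cell with
  | none => true
  | some s => PySem.Str.strip s == ""

-- B's `value_above(i, c)`: `for j in range(i-1, -1, -1)` scanning upward, ported as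
-- downward recursion on i (j := i-1 is examined first); '' when the loop exhausts
def pvValueAbove (table : List (List (Option String))) (c : Nat) : Nat → Option String
  | 0 => some ""
  | i + 1 =>
    let row := table.getD i []
    if c < row.length && !(pvIsEmptyB (row.getD c none)) then row.getD c none
    else pvValueAbove table c i

-- the nested comprehensions over `enumerate(table)` / `enumerate(row)` (zipIdx = enumerate)
def fill_merged_cells_alt (table : List (List (Option String))) : List (List (Option String)) :=
  if table.isEmpty then table
  else
    let width := (table.headD []).length
    (table.zipIdx).map (fun p =>
      (p.1.zipIdx).map (fun q =>
        if q.2 < width && pvIsEmptyB q.1 then pvValueAbove table q.2 p.2 else q.1))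

-- ===== PRECONDITION & SPEC =====
def Spec_fill_merged_cells (table : List (List (Option String))) (out : List (List (Option String))) : Prop := out = fill_merged_cells_alt table
instance (table : List (List (Option String))) (out : List (List (Option String))) : Decidable (Spec_fill_merged_cells table out) := by unfold Spec_fill_merged_cells; infer_instance

-- ===== CLAIM (what is proved, stated in full; the proofs are below) =====
def Claim_equal_fill_merged_cells : Prop := ∀ (table : List (List (Option String))), Dom_fill_merged_cells table → Spec_fill_merged_cells table (fill_merged_cells table)

-- ===== LEMMAS AND PROOFS =====

-- the two ports' cell-emptiness tests agree
lemma pvEmpty_eq (cell : Option String) : pvIsEmptyB cell = pvIsEmptyCell cell := by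
  cases cell <;> rfl

-- ---- a forward-fill intermediate form (proof-only): one row-major pass threading a last-value array ----

def pvStepCellB (p : List (Option String) × List (Option String)) (c : Nat) :
    List (Option String) × List (Option String) :=
  if c ≥ p.1.length then p
  else
    let cell := p.1.getD c none
    if pvIsEmptyCell cell then (p.1.set c (some ((p.2.getD c none).getD "")), p.2)
    else (p.1, p.2.set c cell)

def pvFillRowsB (cols : List Nat) : List (Option String) → List (List (Option String)) → List (List (Option String))
  | _, [] => []
  | lasts, r :: rs =>
    let p := cols.foldl pvStepCellB (r, lasts)
    p.1 :: pvFillRowsB cols p.2 rs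

-- ---- A equals the forward-fill form ----

lemma pvStepCellB_snd_length (p : List (Option String) × List (Option String)) (c : Nat) :
    ((pvStepCellB p c).2).length = p.2.length := by
  simp only [pvStepCellB]
  split_ifs <;> simp

lemma pvFoldStep_snd_length (cols : List Nat) :
    ∀ p : List (Option String) × List (Option String),
      ((cols.foldl pvStepCellB p).2).length = p.2.length := by
  induction cols with
  | nil => intro p; rfl
  | cons c cs ih => intro p; rw [List.foldl_cons, ih, pvStepCellB_snd_length]

lemma pvStepCellB_snd_getD_ne (p : List (Option String) × List (Option String)) (c c' : Nat)
    (h : c' ≠ c) : ((pvStepCellB p c).2).getD c' none = p.2.getD c' none := by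
  simp only [pvStepCellB]
  split_ifs <;> simp [List.getD, List.getElem?_set_ne (Ne.symm h)]

lemma pvFoldStep_snd_getD_not_mem (cols : List Nat) :
    ∀ (p : List (Option String) × List (Option String)) (c : Nat), c ∉ cols →
      ((cols.foldl pvStepCellB p).2).getD c none = p.2.getD c none := by
  induction cols with
  | nil => intro p c _; rfl
  | cons c' cs ih =>
    intro p c hc
    have hne : c ≠ c' := fun h => hc (by simp [h])
    have hmem : c ∉ cs := fun h => hc (List.mem_cons_of_mem _ h)
    rw [List.foldl_cons, ih _ _ hmem, pvStepCellB_snd_getD_ne _ _ _ hne]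

lemma pvFillColA_nil_fold (cols : List Nat) (f : Nat → Option String) :
    cols.foldl (fun t c => pvFillColA c (f c) t) [] = [] := by
  induction cols with
  | nil => rfl
  | cons c cs ih => simpa [pvFillColA] using ih

-- peeling the head row off A's per-column passes gives the forward row step
lemma pvPeel (cols : List Nat) :
    ∀ (lasts : List (Option String)) (r : List (Option String)) (rs : List (List (Option String))),
      (∀ c ∈ cols, c < lasts.length) → cols.Pairwise (· ≠ ·) →
      cols.foldl (fun t c => pvFillColA c (lasts.getD c none) t) (r :: rs)
      = (cols.foldl pvStepCellB (r, lasts)).1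
        :: cols.foldl (fun t c => pvFillColA c (((cols.foldl pvStepCellB (r, lasts)).2).getD c none) t) rs := by
  induction cols with
  | nil => intro lasts r rs _ _; rfl
  | cons c cs ih =>
    intro lasts r rs hlen hnd
    have hc_notmem : c ∉ cs := fun h => (List.pairwise_cons.mp hnd).1 c h rfl
    have hnd' := (List.pairwise_cons.mp hnd).2
    have hlen' : ∀ c' ∈ cs, c' < lasts.length :=
      fun c' hc' => hlen c' (List.mem_cons_of_mem _ hc')
    rw [List.foldl_cons, List.foldl_cons, List.foldl_cons]
    by_cases hge : r.length ≤ c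
    · have hstep : pvStepCellB (r, lasts) c = (r, lasts) := by
        simp only [pvStepCellB]; simp [hge]
      have hcol : pvFillColA c (lasts.getD c none) (r :: rs)
          = r :: pvFillColA c (lasts.getD c none) rs := by
        simp only [pvFillColA]; simp [hge]
      rw [hcol, hstep, ih lasts r (pvFillColA c (lasts.getD c none) rs) hlen' hnd']
      rw [pvFoldStep_snd_getD_not_mem cs _ c hc_notmem]
    · rw [Nat.not_le] at hge
      by_cases hemp : pvIsEmptyCell (r.getD c none) = true
      · have hstep : pvStepCellB (r, lasts) c
            = (r.set c (some ((lasts.getD c none).getD "")), lasts) := by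
          simp only [pvStepCellB]; simp [Nat.not_le.mpr hge, List.getD] at hemp ⊢; simp [hemp]
        have hcol : pvFillColA c (lasts.getD c none) (r :: rs)
            = r.set c (some ((lasts.getD c none).getD "")) :: pvFillColA c (lasts.getD c none) rs := by
          simp only [pvFillColA]; simp [Nat.not_le.mpr hge, List.getD] at hemp ⊢; simp [hemp]
        rw [hcol, hstep, ih lasts _ (pvFillColA c (lasts.getD c none) rs) hlen' hnd']
        rw [pvFoldStep_snd_getD_not_mem cs _ c hc_notmem]
      · have hstep : pvStepCellB (r, lasts) c = (r, lasts.set c (r.getD c none)) := by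
          simp only [pvStepCellB]; simp [Nat.not_le.mpr hge, List.getD] at hemp ⊢; simp [hemp]
        have hcol : pvFillColA c (lasts.getD c none) (r :: rs)
            = r :: pvFillColA c (r.getD c none) rs := by
          simp only [pvFillColA]; simp [Nat.not_le.mpr hge, List.getD] at hemp ⊢; simp [hemp]
        rw [hcol, hstep]
        have hfun : cs.foldl (fun t c' => pvFillColA c' (lasts.getD c' none) t)
              (r :: pvFillColA c (r.getD c none) rs)
            = cs.foldl (fun t c' => pvFillColA c' ((lasts.set c (r.getD c none)).getD c' none) t)
              (r :: pvFillColA c (r.getD c none) rs) := by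
          apply PySem.List.foldl_congr_mem
          intro acc x hx
          have hne : x ≠ c := fun h => hc_notmem (h ▸ hx)
          rw [List.getD, List.getD, List.getElem?_set_ne (Ne.symm hne)]
        rw [hfun, ih (lasts.set c (r.getD c none)) r (pvFillColA c (r.getD c none) rs)
            (fun c' hc' => by simpa using hlen' c' hc') hnd']
        have htail : ((cs.foldl pvStepCellB (r, lasts.set c (r.getD c none))).2).getD c none
            = r.getD c none := by
          rw [pvFoldStep_snd_getD_not_mem cs _ c hc_notmem, List.getD,
            List.getElem?_set_self (hlen c List.mem_cons_self)]
          rfl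
        rw [htail]

lemma pvMain (cols : List Nat) (hnd : cols.Pairwise (· ≠ ·)) :
    ∀ (rows : List (List (Option String))) (lasts : List (Option String)),
      (∀ c ∈ cols, c < lasts.length) →
      cols.foldl (fun t c => pvFillColA c (lasts.getD c none) t) rows
      = pvFillRowsB cols lasts rows := by
  intro rows
  induction rows with
  | nil => intro lasts _; rw [pvFillRowsB]; exact pvFillColA_nil_fold cols _
  | cons r rs ih =>
    intro lasts hlen
    rw [pvPeel cols lasts r rs hlen hnd, pvFillRowsB]
    have hlen' : ∀ c ∈ cols, c < ((cols.foldl pvStepCellB (r, lasts)).2).length := by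
      intro c hc; rw [pvFoldStep_snd_length]; exact hlen c hc
    rw [ih _ hlen']

lemma pvReplicate_getD (w c : Nat) :
    (List.replicate w (none : Option String)).getD c none = none := by
  rw [List.getD]
  rcases Nat.lt_or_ge c w with h | h
  · simp [h]
  · have : (List.replicate w (none : Option String))[c]? = none := by
      rw [List.getElem?_eq_none_iff]; simpa using h
    simp [this]

-- ---- the forward-fill form equals B ----

-- last non-empty original cell in column c strictly above row i (none if there is none)
def pvLastNE (table : List (List (Option String))) (c : Nat) : Nat → Option String
  | 0 => none
  | i + 1 =>
    let row := table.getD i []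
    if c < row.length && !(pvIsEmptyCell (row.getD c none)) then row.getD c none
    else pvLastNE table c i

lemma pvValueAbove_eq (table : List (List (Option String))) (c i : Nat) :
    pvValueAbove table c i = some ((pvLastNE table c i).getD "") := by
  induction i with
  | zero => rfl
  | succ i ih =>
    simp only [pvValueAbove, pvLastNE, pvEmpty_eq]
    split_ifs with h
    · rcases hcell : (table.getD i []).getD c none with _ | s
      · rw [hcell] at h; simp [pvIsEmptyCell] at h
      · simp
    · exact ih

-- row fold characterisation: result row and last-value array, cell by cell
lemma pvRowFold (cols : List Nat) :
    ∀ (r lasts : List (Option String)), cols.Pairwise (· ≠ ·) →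
      (∀ c ∈ cols, c < lasts.length) →
      ((cols.foldl pvStepCellB (r, lasts)).1.length = r.length
      ∧ (∀ c, (cols.foldl pvStepCellB (r, lasts)).1.getD c none
          = if c ∈ cols ∧ c < r.length ∧ pvIsEmptyCell (r.getD c none) = true
            then some ((lasts.getD c none).getD "") else r.getD c none)
      ∧ (∀ c, (cols.foldl pvStepCellB (r, lasts)).2.getD c none
          = if c ∈ cols ∧ c < r.length ∧ ¬ (pvIsEmptyCell (r.getD c none) = true)
            then r.getD c none else lasts.getD c none)) := by
  induction cols with
  | nil =>
    intro r lasts _ _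
    refine ⟨rfl, fun c => ?_, fun c => ?_⟩ <;> simp
  | cons c0 cs ih =>
    intro r lasts hnd hw
    have hc0 : c0 ∉ cs := fun h => (List.pairwise_cons.mp hnd).1 c0 h rfl
    have hnd' := (List.pairwise_cons.mp hnd).2
    have hw0 : c0 < lasts.length := hw c0 List.mem_cons_self
    rw [List.foldl_cons]
    set p := pvStepCellB (r, lasts) c0 with hp
    have hplen : p.1.length = r.length := by
      rw [hp]; simp only [pvStepCellB]; split_ifs <;> simp
    have hp2len : p.2.length = lasts.length := by
      rw [hp]; simp only [pvStepCellB]; split_ifs <;> simp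
    have hw' : ∀ c ∈ cs, c < p.2.length := fun c hc => by
      rw [hp2len]; exact hw c (List.mem_cons_of_mem _ hc)
    obtain ⟨ihlen, ih1, ih2⟩ := ih p.1 p.2 hnd' hw'
    have hp1ne : ∀ c, c ≠ c0 → p.1.getD c none = r.getD c none := by
      intro c hc
      rw [hp]; simp only [pvStepCellB]
      split_ifs <;> simp [List.getD, List.getElem?_set_ne (Ne.symm hc)]
    have hp2ne : ∀ c, c ≠ c0 → p.2.getD c none = lasts.getD c none := by
      intro c hc
      rw [hp]; simp only [pvStepCellB]
      split_ifs <;> simp [List.getD, List.getElem?_set_ne (Ne.symm hc)]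
    have hp1c0 : p.1.getD c0 none
        = if c0 < r.length ∧ pvIsEmptyCell (r.getD c0 none) = true
          then some ((lasts.getD c0 none).getD "") else r.getD c0 none := by
      rw [hp]; simp only [pvStepCellB]
      by_cases h1 : r.length ≤ c0
      · have : ¬ c0 < r.length := Nat.not_lt.mpr h1
        simp [h1, this]
      · have hlt : c0 < r.length := Nat.lt_of_not_le h1
        have hrg : r.getD c0 none = r[c0] := by
          rw [List.getD_eq_getElem?_getD, List.getElem?_eq_getElem hlt]; rfl
        by_cases h2 : pvIsEmptyCell (r.getD c0 none) = true
        · rw [hrg] at h2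
          simp [h1, h2, hlt, List.getD]
        · rw [hrg] at h2
          simp [h1, h2, hlt]
    have hp2c0 : p.2.getD c0 none
        = if c0 < r.length ∧ ¬ (pvIsEmptyCell (r.getD c0 none) = true)
          then r.getD c0 none else lasts.getD c0 none := by
      rw [hp]; simp only [pvStepCellB]
      by_cases h1 : r.length ≤ c0
      · have : ¬ c0 < r.length := Nat.not_lt.mpr h1
        simp [h1, this]
      · have hlt : c0 < r.length := Nat.lt_of_not_le h1
        have hrg : r.getD c0 none = r[c0] := by
          rw [List.getD_eq_getElem?_getD, List.getElem?_eq_getElem hlt]; rfl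
        by_cases h2 : pvIsEmptyCell (r.getD c0 none) = true
        · rw [hrg] at h2
          simp [h1, h2, hlt]
        · rw [hrg] at h2
          simp [h1, h2, hlt, List.getD, List.getElem?_set_self hw0]
    refine ⟨by rw [ihlen, hplen], fun c => ?_, fun c => ?_⟩
    · rw [ih1 c]
      by_cases hin : c ∈ cs
      · have hne : c ≠ c0 := fun h => hc0 (h ▸ hin)
        rw [hp1ne c hne, hp2ne c hne, hplen]
        have h1 : c ∈ c0 :: cs := List.mem_cons_of_mem _ hin
        by_cases h2 : c < r.length ∧ pvIsEmptyCell (r.getD c none) = true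
        · simp [hin, h1, h2.1]
        · rw [if_neg (fun hh => h2 ⟨hh.2.1, hh.2.2⟩), if_neg (fun hh => h2 ⟨hh.2.1, hh.2.2⟩)]
      · rw [if_neg (fun hh => hin hh.1)]
        by_cases hcc : c = c0
        · subst hcc
          rw [hp1c0]
          have hm : c ∈ c :: cs := List.mem_cons_self
          by_cases h2 : c < r.length ∧ pvIsEmptyCell (r.getD c none) = true
          · simp [hm, h2.1]
          · rw [if_neg (fun hh => h2 ⟨hh.1, hh.2⟩), if_neg (fun hh => h2 ⟨hh.2.1, hh.2.2⟩)]
        · rw [hp1ne c hcc]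
          have hnm : c ∉ c0 :: cs := by
            intro h; rcases List.mem_cons.mp h with h | h
            exacts [hcc h, hin h]
          rw [if_neg (fun hh => hnm hh.1)]
    · rw [ih2 c]
      by_cases hin : c ∈ cs
      · have hne : c ≠ c0 := fun h => hc0 (h ▸ hin)
        rw [hp1ne c hne, hp2ne c hne, hplen]
        have h1 : c ∈ c0 :: cs := List.mem_cons_of_mem _ hin
        by_cases h2 : c < r.length ∧ ¬ (pvIsEmptyCell (r.getD c none) = true)
        · simp [hin, h1, h2.1]
        · rw [if_neg (fun hh => h2 ⟨hh.2.1, hh.2.2⟩), if_neg (fun hh => h2 ⟨hh.2.1, hh.2.2⟩)]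
      · rw [if_neg (fun hh => hin hh.1)]
        by_cases hcc : c = c0
        · subst hcc
          rw [hp2c0]
          have hm : c ∈ c :: cs := List.mem_cons_self
          by_cases h2 : c < r.length ∧ ¬ (pvIsEmptyCell (r.getD c none) = true)
          · simp [hm, h2.1]
          · rw [if_neg (fun hh => h2 ⟨hh.1, hh.2⟩), if_neg (fun hh => h2 ⟨hh.2.1, hh.2.2⟩)]
        · rw [hp2ne c hcc]
          have hnm : c ∉ c0 :: cs := by
            intro h; rcases List.mem_cons.mp h with h | h
            exacts [hcc h, hin h]
          rw [if_neg (fun hh => hnm hh.1)]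

-- one row of B, as produced by the forward-fill row fold
lemma pvRowEq (table : List (List (Option String))) (width i : Nat)
    (r lasts : List (Option String)) (hlasts : lasts.length = width)
    (hl : ∀ c, c < width → lasts.getD c none = pvLastNE table c i) :
    ((List.range width).foldl pvStepCellB (r, lasts)).1
      = r.zipIdx.map (fun q =>
          if q.2 < width && pvIsEmptyB q.1 then pvValueAbove table q.2 i else q.1) := by
  obtain ⟨hlen, h1, _⟩ := pvRowFold (List.range width) r lasts
    ((List.nodup_range (n := width)).pairwise_of_forall_ne (fun _ _ _ _ h => h))
    (fun c hc => by rw [hlasts]; exact List.mem_range.mp hc)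
  apply List.ext_getElem
  · simp [hlen]
  · intro j hj hj'
    have hjr : j < r.length := by simpa [hlen] using hj
    have hL : ((List.range width).foldl pvStepCellB (r, lasts)).1[j]
        = ((List.range width).foldl pvStepCellB (r, lasts)).1.getD j none := by
      rw [List.getD_eq_getElem?_getD, List.getElem?_eq_getElem hj]; rfl
    have hrj : r.getD j none = r[j] := by
      rw [List.getD_eq_getElem?_getD, List.getElem?_eq_getElem hjr]; rfl
    rw [hL, h1 j]
    have hR : (r.zipIdx.map (fun q =>
          if q.2 < width && pvIsEmptyB q.1 then pvValueAbove table q.2 i else q.1))[j]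
        = if j < width && pvIsEmptyB r[j] then pvValueAbove table j i else r[j] := by
      simp [List.getElem_zipIdx]
    rw [hR]
    by_cases hcw : j < width
    · by_cases hemp : pvIsEmptyCell (r[j]) = true
      · rw [if_pos ⟨List.mem_range.mpr hcw, hjr, by rw [hrj]; exact hemp⟩,
          if_pos (by simp [hcw, pvEmpty_eq, hemp]),
          pvValueAbove_eq, hl j hcw]
      · rw [if_neg (fun hh => hemp (by rw [← hrj]; exact hh.2.2)),
          if_neg (by simp [pvEmpty_eq, hemp]), hrj]
    · rw [if_neg (fun hh => hcw (List.mem_range.mp hh.1)),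
        if_neg (by simp [hcw]), hrj]

-- stepping the last-value array past row i
lemma pvLastsStep (table : List (List (Option String))) (width i : Nat)
    (r lasts : List (Option String)) (hr : table[i]? = some r)
    (hlasts : lasts.length = width)
    (hl : ∀ c, c < width → lasts.getD c none = pvLastNE table c i) :
    ∀ c, c < width →
      ((List.range width).foldl pvStepCellB (r, lasts)).2.getD c none
        = pvLastNE table c (i + 1) := by
  obtain ⟨_, _, h2⟩ := pvRowFold (List.range width) r lasts
    ((List.nodup_range (n := width)).pairwise_of_forall_ne (fun _ _ _ _ h => h))
    (fun c hc => by rw [hlasts]; exact List.mem_range.mp hc)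
  intro c hc
  have hrg : table.getD i [] = r := by
    rw [List.getD_eq_getElem?_getD, hr]; rfl
  rw [h2 c]
  show _ = (if (c < (table.getD i []).length && !(pvIsEmptyCell ((table.getD i []).getD c none)) : Bool)
      then (table.getD i []).getD c none else pvLastNE table c i)
  rw [hrg]
  by_cases hcond : c < r.length ∧ ¬ pvIsEmptyCell (r.getD c none) = true
  · have hrc : r.getD c none = r[c] := by
      rw [List.getD_eq_getElem?_getD, List.getElem?_eq_getElem hcond.1]; rfl
    have hfalse : pvIsEmptyCell r[c] = false := by
      rw [← hrc]
      cases hx : pvIsEmptyCell (r.getD c none)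
      · rfl
      · exact absurd hx hcond.2
    rw [if_pos ⟨List.mem_range.mpr hc, hcond.1, hcond.2⟩,
      if_pos (by simp [hcond.1, hfalse])]
  · rw [if_neg (fun hh => hcond ⟨hh.2.1, hh.2.2⟩),
      if_neg (by
        intro hb
        simp only [Bool.and_eq_true, decide_eq_true_eq, Bool.not_eq_eq_eq_not,
          Bool.not_true] at hb
        have hb2 : pvIsEmptyCell (r.getD c none) = false := hb.2
        exact hcond ⟨hb.1, fun ht => Bool.false_ne_true (hb2 ▸ ht)⟩),
      hl c hc]

-- B's table, built row by row with an explicit row index (proof-only)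
def pvBuild (table : List (List (Option String))) (width : Nat) :
    Nat → List (List (Option String)) → List (List (Option String))
  | _, [] => []
  | i, r :: rs =>
    (r.zipIdx.map (fun q =>
        if q.2 < width && pvIsEmptyB q.1 then pvValueAbove table q.2 i else q.1))
      :: pvBuild table width (i + 1) rs

lemma pvBridge (table : List (List (Option String))) (width : Nat) :
    ∀ (rs : List (List (Option String))) (i : Nat) (lasts : List (Option String)),
      table.drop i = rs → lasts.length = width →
      (∀ c, c < width → lasts.getD c none = pvLastNE table c i) →
      pvFillRowsB (List.range width) lasts rs = pvBuild table width i rs := by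
  intro rs
  induction rs with
  | nil => intro i lasts _ _ _; rfl
  | cons r rs' ih =>
    intro i lasts hdrop hlasts hl
    have hr : table[i]? = some r := by
      have h0 : (table.drop i)[0]? = table[i + 0]? := List.getElem?_drop ..
      rw [hdrop] at h0
      simpa using h0.symm
    have hdrop' : table.drop (i + 1) = rs' := by
      have : table.drop (i + 1) = (table.drop i).drop 1 := by
        rw [List.drop_drop]
      rw [this, hdrop]; rfl
    rw [pvFillRowsB, pvBuild]
    rw [pvRowEq table width i r lasts hlasts hl]
    rw [ih (i + 1) _ hdrop'
      (by rw [pvFoldStep_snd_length]; exact hlasts)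
      (pvLastsStep table width i r lasts hr hlasts hl)]

lemma pvBuildZip (table : List (List (Option String))) (width : Nat) :
    ∀ (rs : List (List (Option String))) (i : Nat),
      (List.zipIdx rs i).map (fun p =>
        p.1.zipIdx.map (fun q =>
          if q.2 < width && pvIsEmptyB q.1 then pvValueAbove table q.2 p.2 else q.1))
      = pvBuild table width i rs := by
  intro rs
  induction rs with
  | nil => intro i; rfl
  | cons r rs' ih =>
    intro i
    rw [List.zipIdx_cons, List.map_cons, pvBuild, ih (i + 1)]

-- ===== VERDICT (by name: the statement is the Claim_ definition above) =====
theorem fill_merged_cells_spec : Claim_equal_fill_merged_cells := by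
  unfold Claim_equal_fill_merged_cells
  intro table _
  unfold Spec_fill_merged_cells fill_merged_cells fill_merged_cells_alt
  by_cases h : table.isEmpty
  · simp [h]
  · simp only [h]
    set w := (table.headD []).length
    have hfun : (List.range w).foldl (fun t c => pvFillColA c none t) table
        = (List.range w).foldl
            (fun t c => pvFillColA c ((List.replicate w (none : Option String)).getD c none) t) table := by
      apply PySem.List.foldl_congr_mem
      intro acc x _
      rw [pvReplicate_getD]
    rw [hfun]
    rw [pvMain (List.range w) ((List.nodup_range (n := w)).pairwise_of_forall_ne (fun _ _ _ _ h => h))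
      table (List.replicate w none) (fun c hc => by simpa using List.mem_range.mp hc)]
    rw [pvBridge table w table 0 (List.replicate w none) rfl (by simp)
      (fun c _ => by rw [pvReplicate_getD]; rfl)]
    exact (pvBuildZip table w table 0).symm
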